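-- pv_equiv track=rewrite | github.com/KIYI671/AhabAssistantLimbusCompany | tasks/mirror/search_road.py | divide_the_area_by_y
-- ===== SOURCE A (Python) =====
-- def divide_the_area_by_y(data):
--     # 步骤1：按y坐标从小到大排序（确保相近的y相邻）
--     sorted_by_y = sorted(data, key=lambda item: item[1][1])  # item[1]是坐标元组，item[1][1]是y值
--
--     # 步骤2：分组（y相近的归为一组，阈值可根据需求调整）
--     tolerance = 20  # y差值小于等于20视为相近（可根据实际数据调整）
--     groups = []
--     for item in sorted_by_y:
--         current_y = item[1][1]
--         if not groups:
--             # 第一个元素，新建组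
--             groups.append([item])
--         else:
--             # 检查当前元素与最后一个组的最后一个元素的y差值
--             last_group_last_y = groups[-1][-1][1][1]
--             if current_y - last_group_last_y <= tolerance:
--                 # 加入最后一个组
--                 groups[-1].append(item)
--             else:
--                 # 新建组
--                 groups.append([item])
--     return groups
-- ===== SOURCE B (Python) =====
-- def divide_the_area_by_y(data):
--     # Two-phase: sort by y, compute break indices where consecutive y-gap > 20, then slice.
--     s = sorted(data, key=lambda item: item[1][1])
--     if not s:
--         return []
--     n = len(s)
--     breaks = [i for i, (prev, cur) in enumerate(zip(s, s[1:]), 1)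
--               if cur[1][1] - prev[1][1] > 20]
--     bounds = [0] + breaks + [n]
--     return [s[a:b] for a, b in zip(bounds, bounds[1:])]
-- ===== Notes on version B (the rewrite author's own statement) =====
-- stated objective: alternative
-- what changed: A builds the groups in one fold that appends each item to the last group or starts a new one; B is a two-phase decomposition: it first collects the break indices where consecutive sorted y-gaps exceed the tolerance, then slices the sorted list at those bounds.
import Mathlib
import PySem

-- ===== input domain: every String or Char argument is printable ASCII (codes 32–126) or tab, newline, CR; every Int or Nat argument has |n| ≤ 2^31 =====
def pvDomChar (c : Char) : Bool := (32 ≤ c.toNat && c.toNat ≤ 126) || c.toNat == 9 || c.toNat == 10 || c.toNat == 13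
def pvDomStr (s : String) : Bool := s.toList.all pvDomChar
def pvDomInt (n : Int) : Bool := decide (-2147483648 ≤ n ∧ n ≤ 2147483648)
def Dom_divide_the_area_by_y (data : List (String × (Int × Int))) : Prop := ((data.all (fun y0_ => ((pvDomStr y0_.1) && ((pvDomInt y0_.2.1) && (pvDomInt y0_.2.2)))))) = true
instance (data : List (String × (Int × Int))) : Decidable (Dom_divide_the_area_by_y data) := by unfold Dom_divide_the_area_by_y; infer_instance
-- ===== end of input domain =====

-- B replaces A's append-to-last-group fold by a two-phase break-indices-then-slice decomposition (objective: alternative).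

-- ===== PORT A =====
-- literal transliteration of A: sort by y, then one loop growing `groups`,
-- appending to groups[-1] (in-place append modelled as dropLast ++ [last ++ [item]]).
def divide_the_area_by_y (data : List (String × (Int × Int))) : List (List (String × (Int × Int))) :=
  let sorted_by_y := PySem.List.sorted data (fun item => item.2.2)
  let tolerance : Int := 20
  sorted_by_y.foldl (fun groups item =>
    let current_y := item.2.2
    if groups = [] then
      groups ++ [[item]]
    else
      -- groups[-1][-1][1][1]; both indexings are in range here, so the defaults are never read
      let last_group_last_y := (PySem.List.pyGetD (PySem.List.pyGetD groups (-1) []) (-1) ("", (0, 0))).2.2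
      if current_y - last_group_last_y ≤ tolerance then
        groups.dropLast ++ [PySem.List.pyGetD groups (-1) [] ++ [item]]
      else
        groups ++ [[item]]) []

-- ===== PORT B =====
-- literal transliteration of Source B: sort, collect break indices from consecutive pairs, slice at bounds.
def divide_the_area_by_y_alt (data : List (String × (Int × Int))) : List (List (String × (Int × Int))) :=
  let s := PySem.List.sorted data (fun item => item.2.2)
  if s = [] then []
  else
    let n : Int := s.length
    let breaks := ((PySem.List.enumerate (s.zip (PySem.List.slice s (some 1) none)) 1).filter
        (fun q => decide (q.2.2.2.2 - q.2.1.2.2 > 20))).map (·.1)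
    let bounds : List Int := 0 :: breaks ++ [n]
    (bounds.zip bounds.tail).map (fun ab => PySem.List.slice s (some ab.1) (some ab.2))

-- ===== PRECONDITION & SPEC =====
def Spec_divide_the_area_by_y (data : List (String × (Int × Int))) (out : List (List (String × (Int × Int)))) : Prop := out = divide_the_area_by_y_alt data
instance (data : List (String × (Int × Int))) (out : List (List (String × (Int × Int)))) : Decidable (Spec_divide_the_area_by_y data out) := by unfold Spec_divide_the_area_by_y; infer_instance

-- ===== CLAIM (what is proved, stated in full; the proofs are below) =====
def Claim_equal_divide_the_area_by_y : Prop := ∀ (data : List (String × (Int × Int))), Dom_divide_the_area_by_y data → Spec_divide_the_area_by_y data (divide_the_area_by_y data)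

-- ===== LEMMAS AND PROOFS =====

-- the common "chain grouping" recursion both programs compute on the sorted list
def pvAbsorb (cur : List (String × (Int × Int))) (p : String × (Int × Int)) :
    List (String × (Int × Int)) → List (List (String × (Int × Int)))
  | [] => [cur]
  | x :: xs => if x.2.2 - p.2.2 ≤ 20 then pvAbsorb (cur ++ [x]) x xs
               else cur :: pvAbsorb [x] x xs

-- break indices as a recursion over the tail (k = index in the sorted list of the current element x)
def pvBrk (k : Nat) (p : String × (Int × Int)) : List (String × (Int × Int)) → List Int
  | [] => []
  | x :: xs => if x.2.2 - p.2.2 > 20 then (k : Int) :: pvBrk (k + 1) x xs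
               else pvBrk (k + 1) x xs

def pvSlices (s : List (String × (Int × Int))) (bs : List Int) : List (List (String × (Int × Int))) :=
  (bs.zip bs.tail).map (fun ab => PySem.List.slice s (some ab.1) (some ab.2))

-- A's loop body, named
def pvStepA (groups : List (List (String × (Int × Int)))) (item : String × (Int × Int)) :
    List (List (String × (Int × Int))) :=
  let current_y := item.2.2
  if groups = [] then
    groups ++ [[item]]
  else
    let last_group_last_y := (PySem.List.pyGetD (PySem.List.pyGetD groups (-1) []) (-1) ("", (0, 0))).2.2
    if current_y - last_group_last_y ≤ 20 then
      groups.dropLast ++ [PySem.List.pyGetD groups (-1) [] ++ [item]]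
    else
      groups ++ [[item]]

theorem pvFoldA (l : List (String × (Int × Int))) :
    ∀ (gs : List (List (String × (Int × Int)))) (g : List (String × (Int × Int))) (p : String × (Int × Int)),
      l.foldl pvStepA (gs ++ [g ++ [p]]) = gs ++ pvAbsorb (g ++ [p]) p l := by
  induction l with
  | nil => intro gs g p; simp [pvAbsorb]
  | cons x xs ih =>
    intro gs g p
    have hne : gs ++ [g ++ [p]] ≠ [] := by simp
    rw [List.foldl_cons]
    have hstep : pvStepA (gs ++ [g ++ [p]]) x =
        if x.2.2 - p.2.2 ≤ 20 then gs ++ [(g ++ [p]) ++ [x]] else (gs ++ [g ++ [p]]) ++ [[x]] := by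
      simp only [pvStepA, if_neg hne, PySem.List.pyGetD_neg_one_append_singleton,
        List.dropLast_concat]
    rw [hstep]
    by_cases hc : x.2.2 - p.2.2 ≤ 20
    · rw [if_pos hc]
      have := ih gs (g ++ [p]) x
      rw [this]
      simp [pvAbsorb, hc]
    · rw [if_neg hc]
      have := ih (gs ++ [g ++ [p]]) [] x
      simp only [List.nil_append] at this
      rw [this]
      simp [pvAbsorb, hc]

theorem pvEnum (t : List (String × (Int × Int))) :
    ∀ (p : String × (Int × Int)) (k : Nat),
      (((PySem.List.enumerate ((p :: t).zip t) ((k : Nat) : Int)).filter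
          (fun q => decide (q.2.2.2.2 - q.2.1.2.2 > 20))).map (·.1)) = pvBrk k p t := by
  induction t with
  | nil => intro p k; simp [pvBrk]
  | cons x xs ih =>
    intro p k
    rw [List.zip_cons_cons, PySem.List.enumerate_cons]
    have hk1 : ((k : Int) + 1) = (((k + 1 : Nat)) : Int) := by push_cast; ring
    by_cases hc : x.2.2 - p.2.2 > 20
    · simp only [List.filter_cons, decide_eq_true_eq, hc, if_pos, List.map_cons, hk1, ih x (k + 1)]
      simp [pvBrk, hc]
    · simp only [List.filter_cons]
      simp only [decide_eq_true_eq]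
      rw [if_neg hc, hk1, ih x (k + 1)]
      simp [pvBrk, hc]

theorem pvSlices_cons (s : List (String × (Int × Int))) (b0 b1 : Int) (r : List Int) :
    pvSlices s (b0 :: b1 :: r) = PySem.List.slice s (some b0) (some b1) :: pvSlices s (b1 :: r) := by
  simp [pvSlices]

theorem pvSliceSingleton (s : List (String × (Int × Int))) (a : Nat) (p : String × (Int × Int))
    (t : List (String × (Int × Int))) (h : s.drop a = p :: t) :
    PySem.List.slice s (some ((a : Nat) : Int)) (some (((a + 1 : Nat)) : Int)) = [p] := by
  rw [PySem.List.slice_natCast, h]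
  simp

theorem pvSliceExt (s : List (String × (Int × Int))) (a0 a : Nat) (x : String × (Int × Int))
    (t : List (String × (Int × Int))) (h : s.drop (a + 1) = x :: t) (ha : a0 ≤ a + 1) :
    PySem.List.slice s (some ((a0 : Nat) : Int)) (some (((a + 1 : Nat)) : Int)) ++ [x] =
      PySem.List.slice s (some ((a0 : Nat) : Int)) (some (((a + 1 + 1 : Nat)) : Int)) := by
  rw [PySem.List.slice_natCast, PySem.List.slice_natCast]
  have h2 : a + 1 + 1 - a0 = (a + 1 - a0) + 1 := by omega
  rw [h2, List.take_add_one]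
  have hx : (s.drop a0)[a + 1 - a0]? = some x := by
    rw [List.getElem?_drop]
    have : a0 + (a + 1 - a0) = a + 1 := by omega
    rw [this]
    have := congrArg (fun l => l[0]?) h
    simpa [List.getElem?_drop] using this
  rw [hx]
  rfl

theorem pvSliceMain (t : List (String × (Int × Int))) :
    ∀ (p : String × (Int × Int)) (a a0 : Nat) (s : List (String × (Int × Int))),
      a0 ≤ a → s.drop a = p :: t →
      pvSlices s (((a0 : Nat) : Int) :: (pvBrk (a + 1) p t ++ [(s.length : Int)])) =
        pvAbsorb (PySem.List.slice s (some ((a0 : Nat) : Int)) (some (((a + 1 : Nat)) : Int))) p t := by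
  induction t with
  | nil =>
    intro p a a0 s h0 h
    have hlen : s.length = a + 1 := by
      have := congrArg List.length h
      simp [List.length_drop] at this
      omega
    simp only [pvBrk, pvAbsorb]
    rw [pvSlices, hlen]
    simp
  | cons x xs ih =>
    intro p a a0 s h0 h
    have hdrop : s.drop (a + 1) = x :: xs := by
      have h1 : s.drop (a + 1) = (s.drop a).drop 1 := by
        rw [List.drop_drop]
      rw [h1, h]; rfl
    by_cases hc : x.2.2 - p.2.2 > 20
    · -- gap: new break index a+1
      have hb : pvBrk (a + 1) p (x :: xs) = (((a + 1 : Nat)) : Int) :: pvBrk (a + 1 + 1) x xs := by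
        simp [pvBrk, hc]
      rw [hb, List.cons_append, pvSlices_cons]
      rw [ih x (a + 1) (a + 1) s (le_refl _) hdrop]
      rw [pvSliceSingleton s (a + 1) x xs hdrop]
      have hgt : ¬ (x.2.2 - p.2.2 ≤ 20) := by omega
      simp [pvAbsorb, hgt]
    · have hb : pvBrk (a + 1) p (x :: xs) = pvBrk (a + 1 + 1) x xs := by
        simp [pvBrk, hc]
      rw [hb, ih x (a + 1) a0 s (by omega) hdrop]
      rw [← pvSliceExt s a0 a x xs hdrop (by omega)]
      have hle : x.2.2 - p.2.2 ≤ 20 := by omega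
      simp [pvAbsorb, hle]

-- ===== VERDICT (by name: the statement is the Claim_ definition above) =====
theorem divide_the_area_by_y_spec : Claim_equal_divide_the_area_by_y := by
  intro data _
  unfold Spec_divide_the_area_by_y divide_the_area_by_y divide_the_area_by_y_alt
  cases hs : PySem.List.sorted data (fun item => item.2.2) with
  | nil => simp
  | cons x t =>
    simp only [if_neg (by simp : (x :: t : List (String × (Int × Int))) ≠ [])]
    -- A side
    have hA : (x :: t).foldl (fun groups item =>
        let current_y := item.2.2
        if groups = [] then groups ++ [[item]]
        else
          let last_group_last_y := (PySem.List.pyGetD (PySem.List.pyGetD groups (-1) []) (-1) ("", (0, 0))).2.2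
          if current_y - last_group_last_y ≤ 20 then
            groups.dropLast ++ [PySem.List.pyGetD groups (-1) [] ++ [item]]
          else groups ++ [[item]]) [] = pvAbsorb [x] x t := by
      show (x :: t).foldl pvStepA [] = pvAbsorb [x] x t
      rw [List.foldl_cons]
      have h1 : pvStepA [] x = [] ++ [[] ++ [x]] := by simp [pvStepA]
      rw [h1, pvFoldA t [] [] x]
      simp
    rw [hA]
    -- B side
    rw [PySem.List.slice_from_one, List.tail_cons, List.cons_append]
    have henum := pvEnum t x 1
    simp only [Nat.cast_one] at henum
    rw [henum]
    have hmain := pvSliceMain t x 0 0 (x :: t) (le_refl _) (by simp)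
    rw [pvSliceSingleton (x :: t) 0 x t (by simp)] at hmain
    simp only [pvSlices, Nat.zero_add, Nat.cast_zero] at hmain
    exact hmain.symm
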